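-- pv_equiv track=rewrite | github.com/XimiX-x/advent_of_code | 2023/02/enigme.py | decoupe_ligne
-- ===== SOURCE A (Python) =====
-- def decoupe_ligne(line) :
--     """decoupe la ligne"""
--     ligne_cour = ""
--     for x in line :
--         if x in (":", ";", "\n") :
--             yield ligne_cour
--             ligne_cour = ""
--         else :
--             ligne_cour += x
-- ===== SOURCE B (Python) =====
-- def decoupe_ligne(line):
--     """decoupe la ligne"""
--     yield from line.replace(";", ":").replace("\n", ":").split(":")[:-1]
-- ===== Notes on version B (the rewrite author's own statement) =====
-- stated objective: idiomatic
-- what changed: Replaced the character-by-character accumulate-and-yield generator loop with a whole-string pipeline: normalize the two other delimiter characters to the colon with str.replace, split the string once, and drop the trailing unterminated segment by slicing off the last element.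
import Mathlib
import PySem

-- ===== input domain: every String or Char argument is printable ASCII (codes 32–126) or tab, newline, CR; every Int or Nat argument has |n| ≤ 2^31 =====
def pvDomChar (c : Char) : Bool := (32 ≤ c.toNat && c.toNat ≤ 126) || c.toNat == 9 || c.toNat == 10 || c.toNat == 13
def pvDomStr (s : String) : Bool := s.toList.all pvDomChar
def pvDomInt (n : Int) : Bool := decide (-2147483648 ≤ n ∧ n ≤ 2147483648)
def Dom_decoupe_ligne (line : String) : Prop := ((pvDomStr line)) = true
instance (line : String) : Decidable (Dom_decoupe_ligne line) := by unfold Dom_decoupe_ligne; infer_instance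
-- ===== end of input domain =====

-- B replaces the character-by-character accumulate-and-yield generator with an idiomatic
-- normalize / split / drop-last pipeline over the whole string (objective: idiomatic).

-- ===== PORT A =====
-- the for-loop with the accumulator `ligne_cour`; the yielded values are collected in order
def decoupe_ligne_go : List Char → List Char → List String
  | [], _ => []
  | x :: xs, cur =>
    if x = ':' ∨ x = ';' ∨ x = '\n' then
      String.ofList cur :: decoupe_ligne_go xs []
    else
      decoupe_ligne_go xs (cur ++ [x])

def decoupe_ligne (line : String) : List String :=
  decoupe_ligne_go line.toList []

-- ===== PORT B =====
-- line.replace(";", ":").replace("\n", ":").split(":")[:-1]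
def decoupe_ligne_alt (line : String) : List String :=
  PySem.List.slice
    ((PySem.Chars.splitOn
        (PySem.Chars.replace (PySem.Chars.replace line.toList [';'] [':']) ['\n'] [':'])
        [':']).map String.ofList)
    none (some (-1))

-- ===== PRECONDITION & SPEC =====
def Spec_decoupe_ligne (line : String) (out : List String) : Prop := out = decoupe_ligne_alt line
instance (line : String) (out : List String) : Decidable (Spec_decoupe_ligne line out) := by unfold Spec_decoupe_ligne; infer_instance

-- ===== CLAIM (what is proved, stated in full; the proofs are below) =====
def Claim_equal_decoupe_ligne : Prop := ∀ (line : String), Dom_decoupe_ligne line → Spec_decoupe_ligne line (decoupe_ligne line)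

-- ===== LEMMAS AND PROOFS =====

-- the segments of a char list cut at every ':' (empty segments kept, trailing one kept)
def splitSegs : List Char → List (List Char)
  | [] => [[]]
  | c :: cs => if c = ':' then [] :: splitSegs cs else (splitSegs cs).modifyHead (c :: ·)

-- B's first two replaces act per character
def normChar (c : Char) : Char :=
  if c = ';' then ':' else if c = '\n' then ':' else c

lemma splitSegs_ne_nil (cs : List Char) : splitSegs cs ≠ [] := by
  cases cs with
  | nil => simp [splitSegs]
  | cons c cs =>
    simp only [splitSegs]
    split
    · simp
    · cases h : splitSegs cs with
      | nil => exact absurd h (splitSegs_ne_nil cs)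
      | cons a l => simp [List.modifyHead]

lemma replace_single_go (c d : Char) :
    ∀ (fuel : Nat) (l acc : List Char), l.length ≤ fuel →
      PySem.Chars.replace.go [c] [d] fuel l acc
        = acc.reverse ++ l.map (fun x => if x = c then d else x) := by
  intro fuel
  induction fuel with
  | zero =>
    intro l acc h
    have : l = [] := List.eq_nil_of_length_eq_zero (Nat.le_zero.mp h)
    subst this
    simp [PySem.Chars.replace.go]
  | succ n ih =>
    intro l acc h
    cases l with
    | nil => simp [PySem.Chars.replace.go]
    | cons x t =>
      simp only [PySem.Chars.replace.go]
      by_cases hx : x = c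
      · subst hx
        have hpre : List.isPrefixOf [x] (x :: t) = true := by
          simp [List.isPrefixOf]
        rw [if_pos hpre]
        have ht : t.length ≤ n := by simpa using h
        rw [show List.drop ([x].length) (x :: t) = t from by simp]
        rw [ih t ([d].reverse ++ acc) ht]
        simp
      · have hpre : List.isPrefixOf [c] (x :: t) = false := by
          simp [List.isPrefixOf]
          exact fun hh => absurd hh.symm hx
        rw [if_neg (by simp [hpre])]
        have ht : t.length ≤ n := by simpa using h
        rw [ih t (x :: acc) ht]
        simp [hx]

lemma replace_single (c d : Char) (s : List Char) :
    PySem.Chars.replace s [c] [d] = s.map (fun x => if x = c then d else x) := by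
  have : ¬ (List.isEmpty ([c] : List Char) = true) := by simp
  simp only [PySem.Chars.replace, this]
  simpa using replace_single_go c d s.length s [] le_rfl

lemma splitOn_single_go :
    ∀ (fuel : Nat) (l cur : List Char) (acc : List (List Char)), l.length ≤ fuel →
      PySem.Chars.splitOn.go [':'] fuel l cur acc
        = acc.reverse ++ (splitSegs l).modifyHead (cur.reverse ++ ·) := by
  intro fuel
  induction fuel with
  | zero =>
    intro l cur acc h
    have : l = [] := List.eq_nil_of_length_eq_zero (Nat.le_zero.mp h)
    subst this
    simp [PySem.Chars.splitOn.go, splitSegs, List.modifyHead]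
  | succ n ih =>
    intro l cur acc h
    cases l with
    | nil => simp [PySem.Chars.splitOn.go, splitSegs, List.modifyHead]
    | cons x t =>
      simp only [PySem.Chars.splitOn.go]
      have ht : t.length ≤ n := by simpa using h
      by_cases hx : x = ':'
      · have hpre : List.isPrefixOf [':'] (x :: t) = true := by
          simp [List.isPrefixOf, hx]
        rw [if_pos hpre]
        rw [show List.drop (([':'] : List Char).length) (x :: t) = t from by simp]
        rw [ih t [] (cur.reverse :: acc) ht]
        simp [splitSegs, hx]
        cases hs : splitSegs t with
        | nil => exact absurd hs (splitSegs_ne_nil t)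
        | cons a l => simp [List.modifyHead]
      · have hpre : List.isPrefixOf [':'] (x :: t) = false := by
          simp [List.isPrefixOf]
          exact fun hh => absurd hh.symm hx
        rw [if_neg (by simp [hpre])]
        rw [ih t (x :: cur) acc ht]
        simp only [splitSegs, hx, if_false]
        congr 1
        cases hs : splitSegs t with
        | nil => exact absurd hs (splitSegs_ne_nil t)
        | cons a l => simp [List.modifyHead]

lemma splitOn_single (s : List Char) :
    PySem.Chars.splitOn s [':'] = splitSegs s := by
  simp only [PySem.Chars.splitOn]
  rw [splitOn_single_go (s.length + 1) s [] [] (by omega)]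
  cases hs : splitSegs s with
  | nil => exact absurd hs (splitSegs_ne_nil s)
  | cons a l => simp [List.modifyHead]

-- the loop of A computes exactly the non-trailing segments of the normalized string,
-- the first one prefixed with the accumulator
lemma decoupe_ligne_go_eq (cs : List Char) :
    ∀ cur : List Char,
      decoupe_ligne_go cs cur
        = (((splitSegs (cs.map normChar)).modifyHead (cur ++ ·)).dropLast).map String.ofList := by
  induction cs with
  | nil => intro cur; simp [decoupe_ligne_go, splitSegs, List.modifyHead]
  | cons x t ih =>
    intro cur
    by_cases hd : x = ':' ∨ x = ';' ∨ x = '\n'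
    · have hn : normChar x = ':' := by
        rcases hd with h | h | h <;> simp [normChar, h]
      simp only [decoupe_ligne_go, if_pos hd, List.map_cons, hn, splitSegs,
        List.modifyHead]
      rw [ih []]
      cases hs : splitSegs (t.map normChar) with
      | nil => exact absurd hs (splitSegs_ne_nil _)
      | cons a l =>
        simp [List.modifyHead]
    · have hn : normChar x = x := by
        push Not at hd
        simp [normChar, hd.2.1, hd.2.2]
      have hx : ¬ (normChar x = ':') := by rw [hn]; push Not at hd; exact hd.1
      simp only [decoupe_ligne_go, if_neg hd, List.map_cons, splitSegs, if_neg hx]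
      rw [ih (cur ++ [x])]
      rw [hn]
      congr 2
      cases hs : splitSegs (t.map normChar) with
      | nil => exact absurd hs (splitSegs_ne_nil _)
      | cons a l => simp [List.modifyHead]

lemma norm_comp (cs : List Char) :
    ((cs.map (fun x => if x = ';' then ':' else x)).map (fun x => if x = '\n' then ':' else x))
      = cs.map normChar := by
  rw [List.map_map]
  apply List.map_congr_left
  intro a _
  by_cases h1 : a = ';' <;> by_cases h2 : a = '\n' <;>
    simp [normChar, h1, h2, Function.comp]

-- ===== VERDICT (by name: the statement is the Claim_ definition above) =====
theorem decoupe_ligne_spec : Claim_equal_decoupe_ligne := by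
  intro line _
  unfold Spec_decoupe_ligne decoupe_ligne decoupe_ligne_alt
  rw [replace_single, replace_single, norm_comp, splitOn_single]
  rw [decoupe_ligne_go_eq]
  cases hs : splitSegs (line.toList.map normChar) with
  | nil => exact absurd hs (splitSegs_ne_nil _)
  | cons a l =>
    simp [List.modifyHead, PySem.List.slice, PySem.List.clampIdx]
    rw [List.dropLast_eq_take]
    simp
    split_ifs with h
    · omega
    · omega
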